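-- pv_equiv track=rewrite | github.com/dar-wonk/UCI-YSFP-2022 | R64 Analyzer.py | quartile
-- ===== SOURCE A (Python) =====
-- def quartile(phase, mod, intensity):
--     sorted_intensity = [*set(intensity)]
--     sorted_intensity.sort()
--     if (len(sorted_intensity) % 2 != 0):
--         median_index = int((len(sorted_intensity) + 1) / 2)
--     else:
--         median_index = int(len(sorted_intensity) / 2)
--     quartile_index = median_index - int((median_index) / 2)
--     quartile = sorted_intensity[quartile_index]
--     for i in range(len(intensity)):
--         if intensity[i] < quartile:
--             phase[i], mod[i], intensity[i] = 0, 0, 0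
--     return phase, mod, intensity
-- ===== SOURCE B (Python) =====
-- def _select(vals, k):
--     # k-th smallest (0-based) element of a list of distinct values; iterative
--     # quickselect with middle-element pivot.
--     while True:
--         pivot = vals[len(vals) // 2]
--         lo = [v for v in vals if v < pivot]
--         if k < len(lo):
--             vals = lo
--         elif k == len(lo):
--             return pivot
--         else:
--             k -= len(lo) + 1
--             vals = [v for v in vals if v > pivot]
--
--
-- def quartile(phase, mod, intensity):
--     # Threshold = the ((m+3)//4)-th smallest distinct intensity (0-based index
--     # (m+3)//4, m = number of distinct values), found by quickselect instead of sorting.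
--     distinct = list(dict.fromkeys(intensity))
--     t = _select(distinct, (len(distinct) + 3) // 4)
--     new_phase = [p if v >= t else 0 for p, v in zip(phase, intensity)]
--     new_mod = [m if v >= t else 0 for m, v in zip(mod, intensity)]
--     new_intensity = [v if v >= t else 0 for v in intensity]
--     return new_phase, new_mod, new_intensity
-- ===== Notes on version B (the rewrite author's own statement) =====
-- stated objective: alternative
-- what changed: B replaces A's sort of the distinct intensities by a quickselect for the ((m+3)//4)-th smallest distinct value (a closed form for A's parity-cased index arithmetic) and builds the three output lists with zips instead of A's in-place index-assignment loop; asymptotically lighter on average but not measurably faster in CPython, where the C-implemented sort wins.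
-- outside the precondition, e.g. on quartile([1, 2, 3], [4], [0, 9]): A returns ([0, 2, 3], [0], [0, 9]), B returns ([0, 2], [0], [0, 9]); on quartile([7, 8], [9], [1, 5]): A returns ([0, 8], [0], [0, 5]), B returns ([0, 8], [0], [0, 5])
import Mathlib
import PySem

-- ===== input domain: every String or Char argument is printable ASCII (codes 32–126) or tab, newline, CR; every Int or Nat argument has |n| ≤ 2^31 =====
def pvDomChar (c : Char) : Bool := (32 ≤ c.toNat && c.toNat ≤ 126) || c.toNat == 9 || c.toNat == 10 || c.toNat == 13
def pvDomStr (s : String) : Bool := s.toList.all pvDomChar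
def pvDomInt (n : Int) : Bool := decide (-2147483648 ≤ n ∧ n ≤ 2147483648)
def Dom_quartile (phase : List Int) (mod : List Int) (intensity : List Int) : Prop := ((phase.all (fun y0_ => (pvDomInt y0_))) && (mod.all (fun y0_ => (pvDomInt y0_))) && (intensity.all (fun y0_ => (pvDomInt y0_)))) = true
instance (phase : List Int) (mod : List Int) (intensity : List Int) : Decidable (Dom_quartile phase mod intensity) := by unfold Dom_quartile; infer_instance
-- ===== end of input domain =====

-- B replaces A's sort-the-distinct-values pass by a quickselect for the ((m+3)//4)-th
-- smallest distinct value and builds the output lists with zips instead of in-place writes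
-- (an alternative algorithm; not measured faster in CPython). A mutates its three list
-- arguments in place and B does not: the equivalence proved here is about the RETURN value only.

-- ===== PORT A =====
def quartile (phase : List Int) (mod : List Int) (intensity : List Int) : List Int × List Int × List Int :=
  -- [*set(intensity)] then .sort(): the hash order of the set is unmodelled, but sorting
  -- makes the result independent of it, so the two steps port exactly as sorted(Set.ofList …).
  let sorted_intensity := PySem.List.sorted (PySem.Set.ofList intensity) (fun x => x)
  let m : Int := sorted_intensity.length
  -- int((m+1)/2) / int(m/2) / int(mi/2): float division is exact for these list lengths
  -- and int() truncation = floor on nonnegative values, so each is an exact floordiv.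
  let median_index : Int := if PySem.Int.mod m 2 ≠ 0 then PySem.Int.floordiv (m + 1) 2 else PySem.Int.floordiv m 2
  let quartile_index : Int := median_index - PySem.Int.floordiv median_index 2
  -- sorted_intensity[quartile_index]: IndexError when intensity has < 2 distinct values (excluded by Pre_)
  let q := PySem.List.pyGetD sorted_intensity quartile_index 0
  (PySem.List.pyRange 0 (intensity.length : Int) 1).foldl
    (fun (st : List Int × List Int × List Int) i =>
      -- phase[i], mod[i], intensity[i] = 0, 0, 0: pyGetD/pySetD are exact while i is in
      -- range of all three lists (Pre_ demands equal lengths; i < len(intensity) always)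
      if PySem.List.pyGetD st.2.2 i 0 < q then
        (PySem.List.pySetD st.1 i 0, PySem.List.pySetD st.2.1 i 0, PySem.List.pySetD st.2.2 i 0)
      else st)
    (phase, mod, intensity)

-- ===== PORT B =====
-- _select: iterative quickselect (ported as the obvious tail recursion; the Python while
-- loop re-binds vals/k exactly like these recursive calls). vals[len(vals)//2] raises
-- IndexError on []; unreachable under Pre_, the 0 branch is only a totality guard.
-- (pvGetDMid_mem is cited by qselect's decreasing_by.)
lemma pvGetDMid_mem (vals : List Int) (h : vals.length ≠ 0) : vals.getD (vals.length / 2) 0 ∈ vals := by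
  have hm : vals.length / 2 < vals.length := Nat.div_lt_self (Nat.pos_of_ne_zero h) one_lt_two
  rw [List.getD_eq_getElem _ _ hm]
  exact List.getElem_mem _

def qselect (vals : List Int) (k : Int) : Int :=
  if hne : vals.length = 0 then 0
  else
    let pivot := vals.getD (vals.length / 2) 0   -- vals[len(vals)//2]; index always in range (vals ≠ [])
    let lo := vals.filter (fun v => v < pivot)
    if k < (lo.length : Int) then qselect lo k
    else if k = (lo.length : Int) then pivot
    else qselect (vals.filter (fun v => pivot < v)) (k - lo.length - 1)
termination_by vals.length
decreasing_by
  · have h1 : (List.filter (fun x : {y : Int // y ∈ vals} => decide (x.1 < vals.getD (vals.length / 2) 0)) vals.attach).length < vals.attach.length := by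
      refine List.length_filter_lt_length_iff_exists.mpr ⟨⟨_, pvGetDMid_mem vals hne⟩, List.mem_attach _ _, ?_⟩
      simp
    simpa using h1
  · have h1 : (List.filter (fun x : {y : Int // y ∈ vals} => decide (vals.getD (vals.length / 2) 0 < x.1)) vals.attach).length < vals.attach.length := by
      refine List.length_filter_lt_length_iff_exists.mpr ⟨⟨_, pvGetDMid_mem vals hne⟩, List.mem_attach _ _, ?_⟩
      simp
    simpa using h1

def quartile_alt (phase : List Int) (mod : List Int) (intensity : List Int) : List Int × List Int × List Int :=
  let distinct := PySem.List.dedup intensity   -- list(dict.fromkeys(intensity))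
  let t := qselect distinct (PySem.Int.floordiv ((distinct.length : Int) + 3) 4)
  (List.zipWith (fun p v => if v ≥ t then p else 0) phase intensity,
   List.zipWith (fun m v => if v ≥ t then m else 0) mod intensity,
   intensity.map (fun v => if v ≥ t then v else 0))

-- ===== PRECONDITION & SPEC =====
-- Pre_ excludes (a) intensity with fewer than 2 distinct values, where A raises IndexError on
-- the quartile lookup, and (b) mismatched lengths — the natural domain is three parallel
-- lists, and outside it A raises IndexError mid-loop on almost every input (it returns only
-- when every zeroed index happens to fall inside the shorter lists).
def Pre_quartile (phase : List Int) (mod : List Int) (intensity : List Int) : Prop :=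
  2 ≤ (PySem.List.dedup intensity).length ∧ phase.length = intensity.length ∧ mod.length = intensity.length
instance (phase : List Int) (mod : List Int) (intensity : List Int) : Decidable (Pre_quartile phase mod intensity) := by unfold Pre_quartile; infer_instance

def pvWitness_quartile : List Int × List Int × List Int := ([1, 2, 3], [4, 5, 6], [7, 8, 9])

def Spec_quartile (phase : List Int) (mod : List Int) (intensity : List Int) (out : List Int × List Int × List Int) : Prop := out = quartile_alt phase mod intensity
instance (phase : List Int) (mod : List Int) (intensity : List Int) (out : List Int × List Int × List Int) : Decidable (Spec_quartile phase mod intensity out) := by unfold Spec_quartile; infer_instance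

-- ===== CLAIM (what is proved, stated in full; the proofs are below) =====
def Claim_equal_quartile : Prop := ∀ (phase : List Int) (mod : List Int) (intensity : List Int), Dom_quartile phase mod intensity → Pre_quartile phase mod intensity → Spec_quartile phase mod intensity (quartile phase mod intensity)

-- ===== LEMMAS AND PROOFS =====

-- sorted over a nodup list is strictly increasing
lemma pairwise_lt_sorted_of_nodup (l : List Int) (h : l.Nodup) :
    (PySem.List.sorted l (fun x => x)).Pairwise (· < ·) := by
  have h1 := PySem.List.sorted_pairwise l (fun x => x)
  have h2 : (PySem.List.sorted l (fun x => x)).Nodup :=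
    ((PySem.List.sorted_perm l (fun x => x) false).nodup_iff).mpr h
  exact (h1.and h2).imp (fun hab => lt_of_le_of_ne hab.1 hab.2)

lemma getD_append_len {α : Type} (l1 l2 : List α) (x d : α) :
    (l1 ++ x :: l2).getD l1.length d = x := by
  simp [List.getD_eq_getElem?_getD]

lemma getD_append_cons_right {α : Type} (l1 l2 : List α) (x d : α) (m : Nat) (h : l1.length < m) :
    (l1 ++ x :: l2).getD m d = l2.getD (m - l1.length - 1) d := by
  rw [List.getD_eq_getElem?_getD, List.getElem?_append_right (by omega : l1.length ≤ m)]
  have hm : m - l1.length = (m - l1.length - 1) + 1 := by omega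
  rw [hm, List.getElem?_cons_succ, ← List.getD_eq_getElem?_getD]
  simp

-- sorting a nodup list splits around any of its members
lemma sorted_split (d : List Int) (p : Int) (hd : d.Nodup) (hp : p ∈ d) :
    PySem.List.sorted d (fun x => x) =
      PySem.List.sorted (d.filter (fun v => v < p)) (fun x => x) ++
        p :: PySem.List.sorted (d.filter (fun v => p < v)) (fun x => x) := by
  have hlo : (d.filter (fun v => v < p)).Nodup := hd.filter _
  have hhi : (d.filter (fun v => p < v)).Nodup := hd.filter _
  apply PySem.List.sorted_eq_of_perm_of_pairwise_lt
  · -- permutation, by counting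
    rw [List.perm_iff_count]
    intro a
    have hclo := (PySem.List.sorted_perm (d.filter (fun v => v < p)) (fun x => x) false).count_eq a
    have hchi := (PySem.List.sorted_perm (d.filter (fun v => p < v)) (fun x => x) false).count_eq a
    rw [List.count_append, List.count_cons, hclo, hchi]
    rcases lt_trichotomy a p with hlt | heq | hgt
    · have c1 : List.count a (List.filter (fun v => decide (v < p)) d) = List.count a d :=
        List.count_filter (by simpa using hlt)
      have c2 : List.count a (List.filter (fun v => decide (p < v)) d) = 0 :=
        List.count_eq_zero.mpr (fun hmem => by
          rcases List.mem_filter.mp hmem with ⟨-, hb⟩; simp at hb; omega)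
      rw [c1, c2, if_neg (by simp [beq_iff_eq]; omega)]
      omega
    · have c1 : List.count a (List.filter (fun v => decide (v < p)) d) = 0 :=
        List.count_eq_zero.mpr (fun hmem => by
          rcases List.mem_filter.mp hmem with ⟨-, hb⟩; simp at hb; omega)
      have c2 : List.count a (List.filter (fun v => decide (p < v)) d) = 0 :=
        List.count_eq_zero.mpr (fun hmem => by
          rcases List.mem_filter.mp hmem with ⟨-, hb⟩; simp at hb; omega)
      have c3 : List.count a d = 1 := by rw [heq]; exact List.count_eq_one_of_mem hd hp
      rw [c1, c2, c3, if_pos (by simp [heq])]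
    · have c1 : List.count a (List.filter (fun v => decide (p < v)) d) = List.count a d :=
        List.count_filter (by simpa using hgt)
      have c2 : List.count a (List.filter (fun v => decide (v < p)) d) = 0 :=
        List.count_eq_zero.mpr (fun hmem => by
          rcases List.mem_filter.mp hmem with ⟨-, hb⟩; simp at hb; omega)
      rw [c1, c2, if_neg (by simp [beq_iff_eq]; omega)]
      omega
  · -- strictly increasing
    rw [List.pairwise_append]
    refine ⟨pairwise_lt_sorted_of_nodup _ hlo, ?_, ?_⟩
    · rw [List.pairwise_cons]
      refine ⟨fun b hb => ?_, pairwise_lt_sorted_of_nodup _ hhi⟩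
      have := (PySem.List.mem_sorted _ _ _ _).mp hb
      simp at this; exact this.2
    · intro x hx y hy
      have hx' := (PySem.List.mem_sorted _ _ _ _).mp hx
      simp at hx'
      rcases List.mem_cons.mp hy with rfl | hy'
      · omega
      · have hy'' := (PySem.List.mem_sorted _ _ _ _).mp hy'
        simp at hy''
        omega

-- quickselect on a nodup list finds the k-th element of the sorted list
lemma qselect_sorted (n : Nat) : ∀ (d : List Int), d.length ≤ n → ∀ (k : Int), d.Nodup →
    0 ≤ k → k < (d.length : Int) →
    qselect d k = (PySem.List.sorted d (fun x => x)).getD k.toNat 0 := by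
  induction n with
  | zero => intro d hd k _ h0 hk; omega
  | succ n ih =>
    intro d hdn k hnd h0 hk
    have hne : d.length ≠ 0 := by omega
    rw [qselect]
    simp only [hne, dif_neg, not_false_iff]
    set pivot := d.getD (d.length / 2) 0 with hpiv
    have hp : pivot ∈ d := pvGetDMid_mem d hne
    set lo := d.filter (fun v => v < pivot) with hlo
    set hi := d.filter (fun v => pivot < v) with hhi
    have hsplit := sorted_split d pivot hnd hp
    rw [← hlo, ← hhi] at hsplit
    have hlolen : (PySem.List.sorted lo (fun x => x)).length = lo.length :=
      PySem.List.length_sorted ..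
    have hdlen : d.length = lo.length + 1 + hi.length := by
      have h := congrArg List.length hsplit
      simp only [PySem.List.length_sorted, List.length_append, List.length_cons] at h
      omega
    rw [hsplit]
    by_cases h1 : k < (lo.length : Int)
    · rw [if_pos h1, ih lo (by omega) k (hnd.filter _) h0 h1,
        List.getD_append _ _ _ _ (by omega)]
    · rw [if_neg h1]
      by_cases h2 : k = (lo.length : Int)
      · rw [if_pos h2]
        have hkn : k.toNat = (PySem.List.sorted lo (fun x => x)).length := by omega
        rw [hkn, getD_append_len]
      · rw [if_neg h2]
        have hklo : (lo.length : Int) < k := by omega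
        rw [ih hi (by omega) (k - lo.length - 1) (hnd.filter _) (by omega) (by omega),
          getD_append_cons_right _ _ _ _ _ (by omega)]
        congr 1
        omega

-- the zeroed prefix after b loop iterations
def updL (q : Int) (it0 : List Int) (b : Nat) (xs : List Int) : List Int :=
  List.zipWith (fun x v => if v ≥ q then x else 0) (xs.take b) (it0.take b) ++ xs.drop b

lemma updL_eq_cons (q : Int) (it0 xs : List Int) (b : Nat) (hb : b < xs.length) :
    updL q it0 b xs =
      List.zipWith (fun x v => if v ≥ q then x else 0) (xs.take b) (it0.take b)
        ++ xs[b] :: xs.drop (b + 1) := by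
  rw [updL, List.drop_eq_getElem_cons hb]

lemma updL_succ (q : Int) (it0 xs : List Int) (b : Nat) (hb : b < xs.length) (hb' : b < it0.length) :
    updL q it0 (b + 1) xs =
      List.zipWith (fun x v => if v ≥ q then x else 0) (xs.take b) (it0.take b)
        ++ (if it0[b] ≥ q then xs[b] else 0) :: xs.drop (b + 1) := by
  rw [updL, List.take_succ_eq_append_getElem hb, List.take_succ_eq_append_getElem hb',
    List.zipWith_append (by simp [hb.le, hb'.le])]
  simp

lemma len_zip_take (q : Int) (it0 xs : List Int) (b : Nat) (hb : b ≤ xs.length) (hb' : b ≤ it0.length) :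
    (List.zipWith (fun x v => if v ≥ q then x else 0) (xs.take b) (it0.take b)).length = b := by
  simp [List.length_zipWith]; omega

lemma getD_append_len_eq {α : Type} (l1 l2 : List α) (x d : α) (b : Nat) (h : l1.length = b) :
    (l1 ++ x :: l2).getD b d = x := by
  subst h; exact getD_append_len l1 l2 x d

lemma set_append_len_eq {α : Type} (l1 l2 : List α) (x v : α) (b : Nat) (h : l1.length = b) :
    (l1 ++ x :: l2).set b v = l1 ++ v :: l2 := by
  subst h
  rw [List.set_append_right _ _ (le_refl _)]
  simp

lemma loop_eq (q : Int) (ph mo it : List Int)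
    (hph : ph.length = it.length) (hmo : mo.length = it.length) :
    ∀ (b : Nat), b ≤ it.length →
    (PySem.List.pyRange 0 (b : Int) 1).foldl
      (fun (st : List Int × List Int × List Int) i =>
        if PySem.List.pyGetD st.2.2 i 0 < q then
          (PySem.List.pySetD st.1 i 0, PySem.List.pySetD st.2.1 i 0, PySem.List.pySetD st.2.2 i 0)
        else st)
      (ph, mo, it)
      = (updL q it b ph, updL q it b mo, updL q it b it) := by
  intro b
  induction b with
  | zero =>
    intro _
    simp only [Nat.cast_zero, PySem.List.pyRange_one_eq_nil (le_refl (0:Int))]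
    simp [updL]
  | succ b ihb =>
    intro hble
    have hb : b < it.length := by omega
    have hbp : b < ph.length := by omega
    have hbm : b < mo.length := by omega
    have : ((b + 1 : Nat) : Int) = (b : Int) + 1 := by push_cast; ring
    rw [this, PySem.List.pyRange_one_succ_right (by positivity), List.foldl_append,
      ihb (by omega)]
    simp only [List.foldl_cons, List.foldl_nil]
    have hget : PySem.List.pyGetD (updL q it b it) (b : Int) 0 = it[b] := by
      rw [PySem.List.pyGetD_natCast, updL_eq_cons q it it b hb,
        getD_append_len_eq _ _ _ _ _ (len_zip_take q it it b hb.le hb.le)]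
    rw [hget]
    by_cases hcond : it[b] < q
    · rw [if_pos hcond]
      have hset : ∀ (xs : List Int), b < xs.length →
          PySem.List.pySetD (updL q it b xs) (b : Int) 0 = updL q it (b + 1) xs := by
        intro xs hxs
        rw [PySem.List.pySetD_natCast, updL_eq_cons q it xs b hxs,
          set_append_len_eq _ _ _ _ _ (len_zip_take q it xs b hxs.le hb.le),
          updL_succ q it xs b hxs hb, if_neg (by omega : ¬ it[b] ≥ q)]
      rw [hset ph hbp, hset mo hbm, hset it hb]
    · rw [if_neg hcond]
      have hkeep : ∀ (xs : List Int), b < xs.length → updL q it b xs = updL q it (b + 1) xs := by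
        intro xs hxs
        rw [updL_eq_cons q it xs b hxs, updL_succ q it xs b hxs hb,
          if_pos (by omega : it[b] ≥ q)]
      rw [hkeep ph hbp, hkeep mo hbm, hkeep it hb]

lemma zipWith_self_int (f : Int → Int → Int) (l : List Int) :
    List.zipWith f l l = l.map (fun a => f a a) := by
  induction l with
  | nil => rfl
  | cons a t ih => simp

-- quartile_index of A equals (m+3)//4 of B
lemma index_arith (m : Nat) :
    (let mi : Int := if PySem.Int.mod (m : Int) 2 ≠ 0 then PySem.Int.floordiv ((m : Int) + 1) 2
                     else PySem.Int.floordiv (m : Int) 2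
     mi - PySem.Int.floordiv mi 2) = PySem.Int.floordiv ((m : Int) + 3) 4 := by
  simp only [PySem.Int.mod_eq_emod_of_pos (by norm_num : (0:Int) < 2),
    PySem.Int.floordiv_eq_ediv_of_pos (by norm_num : (0:Int) < 2),
    PySem.Int.floordiv_eq_ediv_of_pos (by norm_num : (0:Int) < 4)]
  split <;> omega

-- ===== VERDICT (by name: the statement is the Claim_ definition above) =====
theorem quartile_spec : Claim_equal_quartile := by
  intro phase mod intensity _ hpre
  obtain ⟨h2, hph, hmo⟩ := hpre
  rw [PySem.List.dedup_eq_ofList] at h2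
  unfold Spec_quartile quartile quartile_alt
  simp only [PySem.List.dedup_eq_ofList]
  set d := PySem.Set.ofList intensity with hd
  have hnd : d.Nodup := PySem.Set.nodup_ofList intensity
  have hslen : (PySem.List.sorted d (fun x => x)).length = d.length := PySem.List.length_sorted ..
  -- the two thresholds agree
  have hidx := index_arith d.length
  simp only [] at hidx
  have hkb : (0:Int) ≤ PySem.Int.floordiv ((d.length : Int) + 3) 4 ∧
      PySem.Int.floordiv ((d.length : Int) + 3) 4 < (d.length : Int) := by
    rw [PySem.Int.floordiv_eq_ediv_of_pos (by norm_num : (0:Int) < 4)]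
    omega
  have ht : PySem.List.pyGetD (PySem.List.sorted d (fun x => x))
        ((if PySem.Int.mod ((PySem.List.sorted d (fun x => x)).length : Int) 2 ≠ 0 then
            PySem.Int.floordiv (((PySem.List.sorted d (fun x => x)).length : Int) + 1) 2
          else PySem.Int.floordiv ((PySem.List.sorted d (fun x => x)).length : Int) 2) -
          PySem.Int.floordiv (if PySem.Int.mod ((PySem.List.sorted d (fun x => x)).length : Int) 2 ≠ 0 then
            PySem.Int.floordiv (((PySem.List.sorted d (fun x => x)).length : Int) + 1) 2
          else PySem.Int.floordiv ((PySem.List.sorted d (fun x => x)).length : Int) 2) 2) 0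
      = qselect d (PySem.Int.floordiv ((d.length : Int) + 3) 4) := by
    rw [hslen, hidx, qselect_sorted d.length d (le_refl _) _ hnd hkb.1 hkb.2,
      PySem.List.pyGetD_eq_getElem _ _ hkb.1 (by rw [hslen]; exact hkb.2),
      List.getD_eq_getElem _ _ (by rw [hslen]; omega)]
  rw [ht]
  set t := qselect d (PySem.Int.floordiv ((d.length : Int) + 3) 4) with htt
  rw [loop_eq t phase mod intensity hph hmo intensity.length (le_refl _)]
  have hupd : ∀ xs : List Int, xs.length = intensity.length →
      updL t intensity intensity.length xs =
        List.zipWith (fun x v => if v ≥ t then x else 0) xs intensity := by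
    intro xs hxs
    rw [updL]
    rw [show List.take intensity.length xs = xs by rw [← hxs]; exact List.take_length]
    rw [List.take_length, show List.drop intensity.length xs = [] by rw [← hxs]; exact List.drop_length]
    exact List.append_nil _
  rw [hupd phase hph, hupd mod hmo, hupd intensity rfl, zipWith_self_int]
  rfl
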